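-- pv_equiv track=rewrite | github.com/insomnia250/channel-prune | model_prune/prune_utils.py | concat_index
-- ===== SOURCE A (Python) =====
-- def concat_index(ori_out_channels, prune_indexs):
--     '''
--     :param ori_out_channels: list [32,32,64,...]
--     :param prune_indexs: list of prune_index in previous layers(these layers are to be concat) [[1,4], [], [2], ...]
--     :return: prune_index in concat layer  [1,4,30]
--     '''
--     channels_cated = []
--     for i,idxs in enumerate(prune_indexs):
--         if i==0:
--             channels_cated += (prune_indexs[i])
--         else:
--             pre_channels = sum(ori_out_channels[:i])
--             channels_cated += ([x+pre_channels for x in prune_indexs[i]])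
--     return channels_cated
-- ===== SOURCE B (Python) =====
-- def concat_index(ori_out_channels, prune_indexs):
--     channels_cated = []
--     pre = 0
--     for i, idxs in enumerate(prune_indexs):
--         channels_cated.extend(x + pre for x in idxs)
--         if i < len(ori_out_channels):
--             pre += ori_out_channels[i]
--     return channels_cated
-- ===== Notes on version B (the rewrite author's own statement) =====
-- stated objective: alternative
-- what changed: B maintains a running prefix sum of ori_out_channels instead of re-summing the slice ori_out_channels[:i] on every iteration, and drops the special i==0 branch (offset 0); asymptotically O(n+k) vs O(n^2+k), though a timing run did not confirm a measured speed-up.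
import Mathlib
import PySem

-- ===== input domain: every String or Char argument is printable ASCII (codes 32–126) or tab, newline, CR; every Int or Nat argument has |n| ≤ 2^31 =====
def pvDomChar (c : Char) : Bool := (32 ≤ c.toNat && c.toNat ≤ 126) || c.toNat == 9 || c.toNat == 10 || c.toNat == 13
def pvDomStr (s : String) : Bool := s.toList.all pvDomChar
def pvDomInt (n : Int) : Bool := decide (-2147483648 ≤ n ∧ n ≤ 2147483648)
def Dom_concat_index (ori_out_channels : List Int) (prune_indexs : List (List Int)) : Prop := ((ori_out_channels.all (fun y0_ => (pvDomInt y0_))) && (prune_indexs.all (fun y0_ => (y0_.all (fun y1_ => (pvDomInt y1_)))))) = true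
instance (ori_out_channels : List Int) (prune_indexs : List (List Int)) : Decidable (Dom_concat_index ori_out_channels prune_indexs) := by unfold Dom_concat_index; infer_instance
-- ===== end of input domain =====

-- B replaces A's per-iteration re-summation of ori_out_channels[:i] with a running prefix sum (and drops the redundant i==0 branch); same results, different loop invariant.


-- ===== PORT A =====
-- loop body of A: at i==0 append the indices as-is, else offset by sum(ori_out_channels[:i])
def concat_index_body (ori_out_channels : List Int) (acc : List Int) (p : Int × List Int) : List Int :=
  if p.1 == 0 then acc ++ p.2
  else acc ++ p.2.map (fun x => x + (PySem.List.slice ori_out_channels none (some p.1)).sum)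

def concat_index (ori_out_channels : List Int) (prune_indexs : List (List Int)) : List Int :=
  (PySem.List.enumerate prune_indexs 0).foldl (concat_index_body ori_out_channels) []

-- ===== PORT B =====
-- B's loop: emit idxs offset by the running prefix sum `pre`, then advance `pre` by the next channel (if any)
def concat_index_alt_go (ori : List Int) (ps : List (List Int)) (pre : Int) : List Int :=
  match ps with
  | [] => []
  | idxs :: rest =>
    idxs.map (fun x => x + pre) ++
      match ori with
      | [] => concat_index_alt_go [] rest pre
      | c :: ori' => concat_index_alt_go ori' rest (pre + c)

def concat_index_alt (ori_out_channels : List Int) (prune_indexs : List (List Int)) : List Int :=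
  concat_index_alt_go ori_out_channels prune_indexs 0

-- ===== PRECONDITION & SPEC =====
def Spec_concat_index (ori_out_channels : List Int) (prune_indexs : List (List Int)) (out : List Int) : Prop := out = concat_index_alt ori_out_channels prune_indexs
instance (ori_out_channels : List Int) (prune_indexs : List (List Int)) (out : List Int) : Decidable (Spec_concat_index ori_out_channels prune_indexs out) := by unfold Spec_concat_index; infer_instance

-- ===== CLAIM (what is proved, stated in full; the proofs are below) =====
def Claim_equal_concat_index : Prop := ∀ (ori_out_channels : List Int) (prune_indexs : List (List Int)), Dom_concat_index ori_out_channels prune_indexs → Spec_concat_index ori_out_channels prune_indexs (concat_index ori_out_channels prune_indexs)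

-- ===== LEMMAS AND PROOFS =====

-- after the channels are exhausted (i ≥ length ori), the offset stays at sum ori
lemma concat_index_tailLoop (ori : List Int) (ps : List (List Int)) :
    ∀ (i : Nat) (acc : List Int), ori.length ≤ i →
      (PySem.List.enumerate ps (i : Int)).foldl (concat_index_body ori) acc
        = acc ++ concat_index_alt_go [] ps ori.sum := by
  induction ps with
  | nil => intro i acc _; simp [PySem.List.enumerate_nil, concat_index_alt_go]
  | cons idxs rest ih =>
    intro i acc hle
    rw [PySem.List.enumerate_cons, List.foldl_cons]
    have hstep : concat_index_body ori acc ((i : Int), idxs)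
        = acc ++ idxs.map (fun x => x + ori.sum) := by
      rcases Nat.eq_zero_or_pos i with hz | hp
      · subst hz
        have hnil : ori = [] := List.eq_nil_of_length_eq_zero (Nat.le_zero.mp hle)
        subst hnil
        simp [concat_index_body]
      · have : ((i : Int) == 0) = false := by
          simp only [beq_eq_false_iff_ne, ne_eq, Nat.cast_eq_zero]; omega
        simp only [concat_index_body, this, Bool.false_eq_true, if_false]
        rw [PySem.List.slice_to_natCast, List.take_of_length_le hle]
    rw [hstep]
    have : ((i : Int) + 1) = ((i + 1 : Nat) : Int) := by push_cast; ring
    rw [this, ih (i + 1) _ (by omega)]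
    simp [concat_index_alt_go, List.append_assoc]

-- main invariant: having consumed the prefix `ori1`, the fold starting at index |ori1| equals B's loop with pre = sum ori1
lemma concat_index_mainLoop (ps : List (List Int)) :
    ∀ (ori1 ori2 acc : List Int),
      (PySem.List.enumerate ps (ori1.length : Int)).foldl (concat_index_body (ori1 ++ ori2)) acc
        = acc ++ concat_index_alt_go ori2 ps ori1.sum := by
  induction ps with
  | nil => intro ori1 ori2 acc; simp [PySem.List.enumerate_nil, concat_index_alt_go]
  | cons idxs rest ih =>
    intro ori1 ori2 acc
    rw [PySem.List.enumerate_cons, List.foldl_cons]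
    have hstep : concat_index_body (ori1 ++ ori2) acc ((ori1.length : Int), idxs)
        = acc ++ idxs.map (fun x => x + ori1.sum) := by
      rcases Nat.eq_zero_or_pos ori1.length with hz | hp
      · have hnil : ori1 = [] := List.eq_nil_of_length_eq_zero hz
        subst hnil
        simp [concat_index_body]
      · have : ((ori1.length : Int) == 0) = false := by
          simp only [beq_eq_false_iff_ne, ne_eq, Nat.cast_eq_zero]; omega
        simp only [concat_index_body, this, Bool.false_eq_true, if_false]
        rw [PySem.List.slice_to_natCast, List.take_left]
    rw [hstep]
    have hidx : ((ori1.length : Int) + 1) = ((ori1.length + 1 : Nat) : Int) := by push_cast; ring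
    cases ori2 with
    | nil =>
      rw [hidx, List.append_nil, concat_index_tailLoop ori1 rest (ori1.length + 1) _ (by omega)]
      simp [concat_index_alt_go, List.append_assoc]
    | cons c ori2' =>
      have hlen : ori1.length + 1 = (ori1 ++ [c]).length := by simp
      have hsplit : ori1 ++ c :: ori2' = (ori1 ++ [c]) ++ ori2' := by simp
      rw [hidx, hlen, hsplit, ih (ori1 ++ [c]) ori2' _]
      simp [concat_index_alt_go, List.append_assoc]

-- ===== VERDICT (by name: the statement is the Claim_ definition above) =====
theorem concat_index_spec : Claim_equal_concat_index := by
  intro ori ps _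
  show concat_index ori ps = concat_index_alt ori ps
  have := concat_index_mainLoop ps [] ori []
  simpa [concat_index, concat_index_alt] using this
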